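-- pv_equiv track=rewrite | github.com/gwshield/images | scripts/generate-readme.py | split_by_category
-- ===== SOURCE A (Python) =====
-- def split_by_category(images: dict) -> tuple[list[dict], list[dict]]:
--     """Return (runtime_entries, builder_entries) sorted by name+version."""
--     runtime, builder = [], []
--     for entry in images.values():
--         cat = entry.get("category", "runtime")
--         if cat == "builder":
--             builder.append(entry)
--         else:
--             runtime.append(entry)
--     runtime.sort(key=lambda e: (e.get("name", ""), e.get("version", "")))
--     builder.sort(key=lambda e: (e.get("name", ""), e.get("version", "")))
--     return runtime, builder
-- ===== SOURCE B (Python) =====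
-- def _key(e):
--     return (e.get("name", ""), e.get("version", ""))
--
--
-- def _insort(lst, entry):
--     """Insert entry into already-sorted lst, after all entries with key <= entry's key."""
--     k = _key(entry)
--     i = 0
--     while i < len(lst) and _key(lst[i]) <= k:
--         i += 1
--     lst.insert(i, entry)
--
--
-- def split_by_category(images: dict) -> tuple[list[dict], list[dict]]:
--     """Return (runtime_entries, builder_entries) sorted by name+version."""
--     runtime, builder = [], []
--     for entry in images.values():
--         if entry.get("category", "runtime") == "builder":
--             _insort(builder, entry)
--         else:
--             _insort(runtime, entry)
--     return runtime, builder
-- ===== Notes on version B (the rewrite author's own statement) =====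
-- stated objective: alternative
-- what changed: B replaces partition-then-library-sort with a single online pass that keeps both result lists sorted at all times, inserting each entry into its category's list at the right position as it is seen (an online insertion sort; inserting after equal keys reproduces stable-sort tie order).
import Mathlib
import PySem

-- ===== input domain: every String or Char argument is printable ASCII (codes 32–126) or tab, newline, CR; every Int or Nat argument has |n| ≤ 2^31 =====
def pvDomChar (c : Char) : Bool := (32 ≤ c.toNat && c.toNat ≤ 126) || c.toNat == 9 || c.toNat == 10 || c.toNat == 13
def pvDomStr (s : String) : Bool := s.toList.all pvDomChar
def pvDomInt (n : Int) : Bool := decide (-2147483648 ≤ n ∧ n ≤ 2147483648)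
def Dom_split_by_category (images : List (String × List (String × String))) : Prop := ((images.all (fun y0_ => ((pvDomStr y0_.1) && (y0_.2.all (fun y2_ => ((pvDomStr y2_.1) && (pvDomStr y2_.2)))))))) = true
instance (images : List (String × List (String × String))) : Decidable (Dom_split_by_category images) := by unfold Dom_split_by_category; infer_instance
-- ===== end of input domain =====

-- B replaces A's partition-then-two-library-sorts with a single online pass that keeps both
-- result lists sorted at all times via ordered insertion; objective: alternative algorithm.


-- ===== PORT A =====
-- entry.get(k, dflt) on an entry dict (association list with unique keys): first match
def pvEntryGetD (e : List (String × String)) (k dflt : String) : String :=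
  (List.lookup k e).getD dflt

def split_by_category (images : List (String × List (String × String))) :
    (List (List (String × String))) × (List (List (String × String))) :=
  let p := images.foldl
    (fun (acc : List (List (String × String)) × List (List (String × String))) kv =>
      let entry := kv.2
      let cat := pvEntryGetD entry "category" "runtime"
      if cat = "builder" then (acc.1, acc.2 ++ [entry]) else (acc.1 ++ [entry], acc.2))
    ([], [])
  (PySem.List.sorted2 p.1 (fun e => pvEntryGetD e "name" "") (fun e => pvEntryGetD e "version" "") false,
   PySem.List.sorted2 p.2 (fun e => pvEntryGetD e "name" "") (fun e => pvEntryGetD e "version" "") false)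

-- ===== PORT B =====
-- _key(e) = (e.get("name",""), e.get("version",""))
def pvKey (e : List (String × String)) : String × String :=
  (pvEntryGetD e "name" "", pvEntryGetD e "version" "")

-- _insort: scan past every element whose key tuple is <= entry's key, insert entry there
def pvInsort (lst : List (List (String × String))) (entry : List (String × String)) :
    List (List (String × String)) :=
  match lst with
  | [] => [entry]
  | y :: ys =>
    if decide (toLex (pvKey y) ≤ toLex (pvKey entry))
    then y :: pvInsort ys entry
    else entry :: y :: ys

def split_by_category_alt (images : List (String × List (String × String))) :
    (List (List (String × String))) × (List (List (String × String))) :=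
  images.foldl
    (fun (acc : List (List (String × String)) × List (List (String × String))) kv =>
      let entry := kv.2
      if pvEntryGetD entry "category" "runtime" = "builder"
      then (acc.1, pvInsort acc.2 entry)
      else (pvInsort acc.1 entry, acc.2))
    ([], [])

-- ===== PRECONDITION & SPEC =====
def Spec_split_by_category (images : List (String × List (String × String))) (out : (List (List (String × String))) × (List (List (String × String)))) : Prop := out = split_by_category_alt images
instance (images : List (String × List (String × String))) (out : (List (List (String × String))) × (List (List (String × String)))) : Decidable (Spec_split_by_category images out) := by unfold Spec_split_by_category; infer_instance

-- ===== CLAIM (what is proved, stated in full; the proofs are below) =====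
def Claim_equal_split_by_category : Prop := ∀ (images : List (String × List (String × String))), Dom_split_by_category images → Spec_split_by_category images (split_by_category images)

-- ===== LEMMAS AND PROOFS =====

-- the comparator of A's sorts: strict lexicographic order of the key pair
def pvBf {α κ : Type} [LinearOrder κ] (K : α → κ) : α → α → Bool :=
  fun u v => decide (K u < K v)

-- A's partition loop: appending each element to one of two lists is two filters
theorem pvPartition_foldl {α : Type} (P : α → Prop) [DecidablePred P] (l : List α)
    (r b : List α) :
    l.foldl (fun (acc : List α × List α) x =>
        if P x then (acc.1, acc.2 ++ [x]) else (acc.1 ++ [x], acc.2)) (r, b)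
      = (r ++ l.filter (fun x => !decide (P x)), b ++ l.filter (fun x => decide (P x))) := by
  induction l generalizing r b with
  | nil => simp
  | cons x xs ih =>
    by_cases h : P x <;> simp [h, ih]

-- Python's tuple comparison on a pair of keys is the lexicographic order on κ₁ ×ₗ κ₂
theorem pvLexCmp {σ τ : Type} [LinearOrder σ] [LinearOrder τ] (x1 y1 : σ) (x2 y2 : τ) :
    ((decide (x1 < y1) || (!decide (y1 < x1) && decide (x2 < y2))))
      = decide (toLex (x1, x2) < toLex (y1, y2)) := by
  rcases lt_trichotomy x1 y1 with h|h|h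
  · simp [Prod.Lex.toLex_lt_toLex, h, not_lt_of_gt]
  · simp [Prod.Lex.toLex_lt_toLex, h]
  · simp [Prod.Lex.toLex_lt_toLex, h, not_lt_of_gt h, h.ne']

theorem pvSorted2_eq_foldl {α σ τ : Type} [LinearOrder σ] [LinearOrder τ]
    (xs : List α) (k1 : α → σ) (k2 : α → τ) :
    PySem.List.sorted2 xs k1 k2 false
      = xs.foldl (fun acc x => PySem.List.insertBy (pvBf (fun e => toLex (k1 e, k2 e))) x acc) [] := by
  simp only [PySem.List.sorted2, if_neg (by decide : ¬ (false = true))]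
  congr 1
  funext acc x
  congr 1
  funext u v
  exact pvLexCmp (k1 u) (k1 v) (k2 u) (k2 v)

-- A's stable insertion (before the first strictly greater key) IS B's _insort
-- (past every key that is ≤): the two loop conditions are each other's negation.
theorem pvInsertBy_eq_insort (l : List (List (String × String))) (x : List (String × String)) :
    PySem.List.insertBy (pvBf (fun e => toLex (pvKey e))) x l = pvInsort l x := by
  induction l with
  | nil => rfl
  | cons y ys ih =>
    by_cases h : toLex (pvKey y) ≤ toLex (pvKey x)
    · have : ¬ toLex (pvKey x) < toLex (pvKey y) := not_lt_of_ge h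
      simp [PySem.List.insertBy, pvInsort, pvBf, h, this, ih]
    · have : toLex (pvKey x) < toLex (pvKey y) := lt_of_not_ge h
      simp [PySem.List.insertBy, pvInsort, pvBf, h, this]

-- B's fused loop splits into one insertion-sort fold per category
theorem pvFused_foldl (l : List (List (String × String)))
    (r b : List (List (String × String))) :
    l.foldl (fun (acc : List (List (String × String)) × List (List (String × String))) entry =>
        if pvEntryGetD entry "category" "runtime" = "builder"
        then (acc.1, pvInsort acc.2 entry) else (pvInsort acc.1 entry, acc.2)) (r, b)
      = ((l.filter (fun e => !decide (pvEntryGetD e "category" "runtime" = "builder"))).foldl pvInsort r,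
         (l.filter (fun e => decide (pvEntryGetD e "category" "runtime" = "builder"))).foldl pvInsort b) := by
  induction l generalizing r b with
  | nil => simp
  | cons x xs ih =>
    by_cases h : pvEntryGetD x "category" "runtime" = "builder" <;> simp [h, ih]

-- ===== VERDICT (by name: the statement is the Claim_ definition above) =====
theorem split_by_category_spec : Claim_equal_split_by_category := by
  intro images _
  unfold Spec_split_by_category split_by_category split_by_category_alt
  rw [← List.foldl_map (f := fun kv : String × List (String × String) => kv.2)
      (g := fun (acc : List (List (String × String)) × List (List (String × String))) entry =>
        if pvEntryGetD entry "category" "runtime" = "builder"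
        then (acc.1, acc.2 ++ [entry]) else (acc.1 ++ [entry], acc.2)),
    ← List.foldl_map (f := fun kv : String × List (String × String) => kv.2)
      (g := fun (acc : List (List (String × String)) × List (List (String × String))) entry =>
        if pvEntryGetD entry "category" "runtime" = "builder"
        then (acc.1, pvInsort acc.2 entry) else (pvInsort acc.1 entry, acc.2))]
  rw [pvPartition_foldl (fun e => pvEntryGetD e "category" "runtime" = "builder"),
    pvFused_foldl]
  simp only [List.nil_append]
  rw [Prod.mk.injEq]
  refine ⟨?_, ?_⟩ <;>
  · rw [pvSorted2_eq_foldl]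
    exact PySem.List.foldl_congr_mem _ _ _ _ (fun acc x _ => pvInsertBy_eq_insort acc x)
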